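-- pv_equiv track=rewrite | github.com/Dans-labs/dariah | server/controllers/utils.py | _thinM
-- ===== SOURCE A (Python) =====
-- def _thinM(chunks):
--   modified = []
--   for chunk in chunks[0:-1]:
--     people = {}
--     for m in chunk:
--       people.setdefault(m[0], []).append(m[1])
--     thinned = []
--     for (p, dates) in people.items():
--       thinned.append((p, sorted(dates)[-1]))
--     for m in sorted(thinned, key=lambda x: x[1]):
--       modified.append((m, 1))
--   if len(chunks):
--     for m in chunks[-1]:
--       modified.append((m, 2))
--   return modified
-- ===== SOURCE B (Python) =====
-- def _thinM(chunks):
--   out = []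
--   for chunk in chunks[:-1]:
--     thinned = [(p, max(d for q, d in chunk if q == p))
--                for n, (p, _) in enumerate(chunk)
--                if all(q != p for q, _ in chunk[:n])]
--     out += [(m, 1) for m in sorted(thinned, key=lambda x: x[1])]
--   return out + ([(m, 2) for m in chunks[-1]] if chunks else [])
-- ===== Notes on version B (the rewrite author's own statement) =====
-- stated objective: alternative
-- what changed: B eliminates A's person->list-of-dates dictionary and its collect-then-reduce passes entirely: per chunk it builds thinned by a comprehension that keeps each first occurrence of a person (prefix scan) paired with a direct max over that person's dates in the chunk (nested scans instead of a hash grouping).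
import Mathlib
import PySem

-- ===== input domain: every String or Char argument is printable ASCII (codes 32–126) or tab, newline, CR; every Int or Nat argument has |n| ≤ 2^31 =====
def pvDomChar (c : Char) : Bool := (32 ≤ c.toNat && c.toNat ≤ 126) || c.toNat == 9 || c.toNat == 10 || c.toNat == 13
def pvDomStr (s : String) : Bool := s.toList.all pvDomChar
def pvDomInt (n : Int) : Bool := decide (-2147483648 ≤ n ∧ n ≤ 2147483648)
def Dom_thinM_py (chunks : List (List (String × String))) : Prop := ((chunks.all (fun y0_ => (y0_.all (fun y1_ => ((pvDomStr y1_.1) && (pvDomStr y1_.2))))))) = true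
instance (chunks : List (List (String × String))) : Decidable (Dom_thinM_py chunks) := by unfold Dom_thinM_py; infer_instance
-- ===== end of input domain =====

-- B drops A's person->list-of-dates dictionary: per chunk a comprehension keeps each first
-- occurrence of a person together with a direct max over that person's dates (objective: alternative).

-- ===== PORT A =====
-- literal port of _thinM; 'sorted(dates)[-1]' is ported as pyGet? (-1) with .getD "" — the none
-- case (IndexError on an empty group) is unreachable since every group gets at least one date.
def thinM_py (chunks : List (List (String × String))) : List ((String × String) × Int) :=
  let modified := (PySem.List.slice chunks (some 0) (some (-1))).foldl (fun acc chunk =>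
    let people := chunk.foldl
      (fun d m => d.modify m.1 [] (fun l => l ++ [m.2])) PySem.Dict.empty
    let thinned := people.items.foldl
      (fun t pd => t ++ [(pd.1, (PySem.List.pyGet? (PySem.List.sorted pd.2 (fun x => x) false) (-1)).getD "")])
      ([] : List (String × String))
    (PySem.List.sorted thinned (fun x => x.2) false).foldl (fun a m => a ++ [(m, (1 : Int))]) acc) []
  if chunks.length ≠ 0 then
    ((PySem.List.pyGet? chunks (-1)).getD []).foldl (fun a m => a ++ [(m, (2 : Int))]) modified
  else modified

-- ===== PORT B =====
-- 'max(d for q, d in chunk if q == p)' is ported as max? of the filtered dates with .getD "" —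
-- the none case is unreachable since p itself occurs in the chunk.
def thinM_py_alt (chunks : List (List (String × String))) : List ((String × String) × Int) :=
  let out := (PySem.List.slice chunks none (some (-1))).foldl (fun out chunk =>
    let thinned := ((PySem.List.enumerate chunk 0).filter
        (fun np => (PySem.List.slice chunk none (some np.1)).all (fun q => q.1 != np.2.1))).map
        (fun np => (np.2.1,
          (PySem.List.max? ((chunk.filter (fun q => q.1 == np.2.1)).map (fun q => q.2)) (fun x => x)).getD ""))
    out ++ (PySem.List.sorted thinned (fun x => x.2) false).map (fun m => (m, (1 : Int)))) []
  out ++ (if !chunks.isEmpty then ((PySem.List.pyGet? chunks (-1)).getD []).map (fun m => (m, (2 : Int))) else [])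

-- ===== PRECONDITION & SPEC =====
def Spec_thinM_py (chunks : List (List (String × String))) (out : List ((String × String) × Int)) : Prop := out = thinM_py_alt chunks
instance (chunks : List (List (String × String))) (out : List ((String × String) × Int)) : Decidable (Spec_thinM_py chunks out) := by unfold Spec_thinM_py; infer_instance

-- ===== CLAIM (what is proved, stated in full; the proofs are below) =====
def Claim_equal_thinM_py : Prop := ∀ (chunks : List (List (String × String))), Dom_thinM_py chunks → Spec_thinM_py chunks (thinM_py chunks)

-- ===== LEMMAS AND PROOFS =====

-- A's per-group value: last element of the sorted dates
def pvMx (dates : List String) : String :=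
  (PySem.List.pyGet? (PySem.List.sorted dates (fun x => x) false) (-1)).getD ""

lemma pvMx_isMax (xs : List String) (h : xs ≠ []) : pvMx xs ∈ xs ∧ ∀ y ∈ xs, y ≤ pvMx xs := by
  have hs : PySem.List.sorted xs (fun x => x) false ≠ [] := by
    simpa [PySem.List.sorted_eq_nil_iff] using h
  have hlast : (PySem.List.sorted xs (fun x => x) false).getLast? =
      some ((PySem.List.sorted xs (fun x => x) false).getLast hs) :=
    List.getLast?_eq_some_getLast hs
  have hval : pvMx xs = (PySem.List.sorted xs (fun x => x) false).getLast hs := by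
    simp [pvMx, PySem.List.pyGet?_neg_one, hlast]
  constructor
  · rw [hval]
    exact (PySem.List.mem_sorted xs (fun x => x) false _).mp (List.getLast_mem hs)
  · intro y hy
    have hy' : y ∈ PySem.List.sorted xs (fun x => x) false :=
      (PySem.List.mem_sorted xs (fun x => x) false y).mpr hy
    obtain ⟨i, hi, hyi⟩ := List.mem_iff_getElem.mp hy'
    rw [hval, List.getLast_eq_getElem]
    have := PySem.List.sorted_id_getElem_mono xs
      (p := i) (q := (PySem.List.sorted xs (fun x => x) false).length - 1)
      (by omega) (by omega)
    simpa [hyi] using this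

-- A's last-of-sorted equals B's max on a nonempty list
lemma pvMx_eq_max (xs : List String) (h : xs ≠ []) :
    pvMx xs = (PySem.List.max? xs (fun x => x)).getD "" := by
  obtain ⟨m, hm⟩ : ∃ m, PySem.List.max? xs (fun x => x) = some m := by
    rcases e : PySem.List.max? xs (fun x => x) with _ | m
    · exact absurd ((PySem.List.max?_eq_none_iff xs (fun x => x)).mp e) h
    · exact ⟨m, rfl⟩
  obtain ⟨h1, h2⟩ := pvMx_isMax xs h
  rw [hm, Option.getD_some]
  exact le_antisymm (PySem.List.max?_isMax hm _ h1) (h2 m (PySem.List.max?_mem hm))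

-- B's first-occurrence comprehension lists exactly the distinct persons in first-occurrence order
lemma pv_firstocc (xs : List (String × String)) :
    ((PySem.List.enumerate xs 0).filter
        (fun np => (PySem.List.slice xs none (some np.1)).all (fun q => q.1 != np.2.1))).map
      (fun np => np.2.1)
    = PySem.Set.ofList (xs.map Prod.fst) := by
  induction xs using List.reverseRecOn with
  | nil => rfl
  | append_singleton ys m ih =>
    rw [PySem.List.enumerate_append, List.filter_append, List.map_append]
    have h1 : (PySem.List.enumerate ys 0).filter
          (fun np => (PySem.List.slice (ys ++ [m]) none (some np.1)).all (fun q => q.1 != np.2.1))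
        = (PySem.List.enumerate ys 0).filter
          (fun np => (PySem.List.slice ys none (some np.1)).all (fun q => q.1 != np.2.1)) := by
      apply List.filter_congr
      intro np hnp
      obtain ⟨k, hk, rfl⟩ := (PySem.List.mem_enumerate_iff ys 0 np).mp hnp
      have hidx : ((0 : Int) + (k : Int)) = ((k : Nat) : Int) := by omega
      rw [hidx, PySem.List.slice_to_natCast, PySem.List.slice_to_natCast,
          List.take_append_of_le_length (by omega)]
    rw [h1, ih]
    have h2 : PySem.List.enumerate [m] (0 + (ys.length : Int)) = [((ys.length : Int), m)] := by
      rw [PySem.List.enumerate_cons, PySem.List.enumerate_nil]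
      norm_num
    rw [h2]
    have h4 : PySem.Set.ofList ((ys ++ [m]).map Prod.fst)
        = PySem.Set.add (PySem.Set.ofList (ys.map Prod.fst)) m.1 := by
      rw [List.map_append, PySem.Set.ofList_eq_foldl, List.foldl_append]
      simp [PySem.Set.ofList_eq_foldl]
    rw [h4]
    by_cases hc : m.1 ∈ ys.map Prod.fst
    · have hall : ((ys ++ [m]).take ys.length).all (fun q => q.1 != m.1) = false := by
        simp only [List.all_eq_false, bne_iff_ne, ne_eq, not_not, List.take_left]
        obtain ⟨q, hq, hqe⟩ := List.mem_map.mp hc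
        exact ⟨q, hq, hqe⟩
      have : (List.filter (fun np => (PySem.List.slice (ys ++ [m]) none (some np.1)).all (fun q => q.1 != np.2.1)) [((ys.length : Int), m)]) = [] := by
        simp only [List.filter_singleton, PySem.List.slice_to_natCast, hall, cond_false]
      rw [this]
      simp [PySem.Set.add, PySem.Set.contains, hc]
    · have hall : ((ys ++ [m]).take ys.length).all (fun q => q.1 != m.1) = true := by
        simp only [List.all_eq_true, bne_iff_ne, ne_eq, List.take_left]
        intro q hq hqe
        exact hc (List.mem_map.mpr ⟨q, hq, hqe⟩)
      have : (List.filter (fun np => (PySem.List.slice (ys ++ [m]) none (some np.1)).all (fun q => q.1 != np.2.1)) [((ys.length : Int), m)]) = [((ys.length : Int), m)] := by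
        simp only [List.filter_singleton, PySem.List.slice_to_natCast, hall, cond_true]
      rw [this]
      simp [PySem.Set.add, PySem.Set.contains, hc]

-- per chunk: A's thinned (from the grouping dict) equals B's thinned (from the comprehension)
lemma pv_thinned (chunk : List (String × String)) :
    ((chunk.foldl (fun d m => d.modify m.1 [] (fun l => l ++ [m.2])) PySem.Dict.empty).items.foldl
      (fun t pd => t ++ [(pd.1, (PySem.List.pyGet? (PySem.List.sorted pd.2 (fun x => x) false) (-1)).getD "")])
      ([] : List (String × String)))
    = ((PySem.List.enumerate chunk 0).filter
        (fun np => (PySem.List.slice chunk none (some np.1)).all (fun q => q.1 != np.2.1))).map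
      (fun np => (np.2.1,
        (PySem.List.max? ((chunk.filter (fun q => q.1 == np.2.1)).map (fun q => q.2)) (fun x => x)).getD "")) := by
  have hnd : (chunk.foldl (fun d m => d.modify m.1 [] (fun l => l ++ [m.2])) PySem.Dict.empty).keys.Nodup :=
    PySem.Dict.nodup_keys_foldl_modify_key chunk Prod.fst [] (fun _ x => fun l => l ++ [x.2])
      PySem.Dict.empty PySem.Dict.nodup_keys_empty
  have hkeys : (chunk.foldl (fun d m => d.modify m.1 [] (fun l => l ++ [m.2])) PySem.Dict.empty).keys
      = PySem.Set.ofList (chunk.map Prod.fst) := by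
    rw [PySem.Dict.keys_foldl_modify_key]
    simp [PySem.Set.update, PySem.Set.ofList_eq_foldl, PySem.Dict.keys_empty]
  have hval : ∀ k, (chunk.foldl (fun d m => d.modify m.1 [] (fun l => l ++ [m.2])) PySem.Dict.empty).getD k []
      = (chunk.filter (fun p => p.1 == k)).map (fun p => p.2) := by
    intro k
    rw [PySem.Dict.getD_foldl_modify_append]
    simp
  rw [PySem.List.foldl_append_singleton_eq_map, List.nil_append,
      PySem.Dict.items_eq_map_keys _ hnd [], hkeys, List.map_map]
  have hB : ((PySem.List.enumerate chunk 0).filter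
        (fun np => (PySem.List.slice chunk none (some np.1)).all (fun q => q.1 != np.2.1))).map
      (fun np => (np.2.1,
        (PySem.List.max? ((chunk.filter (fun q => q.1 == np.2.1)).map (fun q => q.2)) (fun x => x)).getD ""))
      = (((PySem.List.enumerate chunk 0).filter
        (fun np => (PySem.List.slice chunk none (some np.1)).all (fun q => q.1 != np.2.1))).map
          (fun np => np.2.1)).map
        (fun p => (p, (PySem.List.max? ((chunk.filter (fun q => q.1 == p)).map (fun q => q.2)) (fun x => x)).getD "")) := by
    rw [List.map_map]; rfl
  rw [hB, pv_firstocc]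
  apply List.map_congr_left
  intro p hp
  have hp' : p ∈ chunk.map Prod.fst := (PySem.Set.mem_ofList _ _).mp hp
  obtain ⟨q, hq, hqe⟩ := List.mem_map.mp hp'
  have hne : (chunk.filter (fun r => r.1 == p)).map (fun r => r.2) ≠ [] := by
    have : q ∈ chunk.filter (fun r => r.1 == p) :=
      List.mem_filter.mpr ⟨hq, by simp [hqe]⟩
    exact List.ne_nil_of_mem (List.mem_map.mpr ⟨q, this, rfl⟩)
  have := pvMx_eq_max _ hne
  simp only [Function.comp_apply, hval p]
  rw [← this]
  rfl

theorem main_eq (chunks : List (List (String × String))) : thinM_py chunks = thinM_py_alt chunks := by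
  have hfold : ∀ (l : List (List (String × String))) (acc : List ((String × String) × Int)),
      l.foldl (fun acc chunk =>
        let people := chunk.foldl
          (fun d m => d.modify m.1 [] (fun l => l ++ [m.2])) PySem.Dict.empty
        let thinned := people.items.foldl
          (fun t pd => t ++ [(pd.1, (PySem.List.pyGet? (PySem.List.sorted pd.2 (fun x => x) false) (-1)).getD "")])
          ([] : List (String × String))
        (PySem.List.sorted thinned (fun x => x.2) false).foldl (fun a m => a ++ [(m, (1 : Int))]) acc) acc
      = l.foldl (fun out chunk =>
        let thinned := ((PySem.List.enumerate chunk 0).filter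
            (fun np => (PySem.List.slice chunk none (some np.1)).all (fun q => q.1 != np.2.1))).map
            (fun np => (np.2.1,
              (PySem.List.max? ((chunk.filter (fun q => q.1 == np.2.1)).map (fun q => q.2)) (fun x => x)).getD ""))
        out ++ (PySem.List.sorted thinned (fun x => x.2) false).map (fun m => (m, (1 : Int)))) acc := by
    intro l acc
    apply PySem.List.foldl_congr_mem
    intro acc chunk _
    simp only
    rw [pv_thinned chunk, PySem.List.foldl_append_singleton_eq_map]
  cases chunks with
  | nil => rfl
  | cons c cs =>
    simp only [thinM_py, thinM_py_alt, PySem.List.slice_zero_start]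
    rw [hfold]
    have hlast : PySem.List.pyGet? (c :: cs) (-1) = some ((c :: cs).getLast (by simp)) := by
      rw [PySem.List.pyGet?_neg_one, List.getLast?_eq_some_getLast]
    rw [hlast]
    simp only [List.length_cons, List.isEmpty_cons, Bool.not_false,
      if_pos (by omega : (cs.length + 1 : Nat) ≠ 0), Option.getD_some, if_pos trivial]
    rw [PySem.List.foldl_append_singleton_eq_map]

-- ===== VERDICT (by name: the statement is the Claim_ definition above) =====
theorem thinM_py_spec : Claim_equal_thinM_py := by
  intro chunks _
  exact main_eq chunks
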